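-- pv_equiv track=rewrite | github.com/PrabhakaranVijay/f1PitWall | backend/app/domains/lap/service.py | _latest_stints
-- ===== SOURCE A (Python) =====
-- from typing import Any
--
-- def _latest_stints(stints: list[dict[str, Any]]) -> dict[int, dict[str, Any]]:
--     latest: dict[int, dict[str, Any]] = {}
--     for stint in stints:
--         driver_number = stint.get("driver_number")
--         if driver_number is None:
--             continue
--
--         previous = latest.get(driver_number)
--         candidate_key = (stint.get("stint_number", 0), stint.get("lap_end", 0))
--         previous_key = (
--             (previous or {}).get("stint_number", 0),
--             (previous or {}).get("lap_end", 0),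
--         )
--         if previous is None or candidate_key >= previous_key:
--             latest[driver_number] = stint
--     return latest
-- ===== SOURCE B (Python) =====
-- from typing import Any
--
-- def _latest_stints(stints: list[dict[str, Any]]) -> dict[int, dict[str, Any]]:
--     # group stints per driver (input order), then reduce each group:
--     # max over the reversed group keeps the LAST stint among equal keys,
--     # matching the '>=' streaming update.
--     groups: dict[int, list[dict[str, Any]]] = {}
--     for stint in stints:
--         dn = stint.get("driver_number")
--         if dn is None:
--             continue
--         groups.setdefault(dn, []).append(stint)
--     return {
--         dn: max(reversed(group),
--                 key=lambda s: (s.get("stint_number", 0), s.get("lap_end", 0)))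
--         for dn, group in groups.items()
--     }
-- ===== Notes on version B (the rewrite author's own statement) =====
-- stated objective: alternative
-- what changed: A is a single streaming fold keeping one best stint per driver with a '>=' in-place update; B first builds a per-driver group table in input order and then, per group, reduces with max over the reversed group (build-table-then-reduce instead of streaming).
import Mathlib
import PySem

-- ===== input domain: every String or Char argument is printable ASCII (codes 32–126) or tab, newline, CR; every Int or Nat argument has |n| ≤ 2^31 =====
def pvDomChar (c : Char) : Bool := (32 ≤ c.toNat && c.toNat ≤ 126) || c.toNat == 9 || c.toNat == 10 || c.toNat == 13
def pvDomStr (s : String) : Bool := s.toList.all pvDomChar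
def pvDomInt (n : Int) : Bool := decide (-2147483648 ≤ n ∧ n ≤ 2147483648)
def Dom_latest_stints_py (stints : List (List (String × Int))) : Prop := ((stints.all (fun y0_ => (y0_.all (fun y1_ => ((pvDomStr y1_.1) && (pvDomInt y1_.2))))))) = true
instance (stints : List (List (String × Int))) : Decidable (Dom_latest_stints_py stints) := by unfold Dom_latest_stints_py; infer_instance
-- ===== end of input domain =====

-- B groups stints per driver and reduces each group with a reversed max, instead of A's
-- single streaming '>=' fold; same cost, different decomposition (objective: alternative).

-- ===== PORT A =====
-- stint.get(k) on a dict[str,int] (association list, first match wins)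
def aGet? (st : List (String × Int)) (k : String) : Option Int :=
  (st.find? (fun p => p.1 == k)).map (fun p => p.2)

-- stint.get(k, d)
def aGetD (st : List (String × Int)) (k : String) (d : Int) : Int :=
  (aGet? st k).getD d

-- Python tuple '>=' on (int, int), lexicographic
def tupGE (a b : Int × Int) : Bool := a.1 > b.1 || (a.1 == b.1 && a.2 ≥ b.2)

-- body of A's 'for stint in stints' loop
def aStep (latest : PySem.Dict Int (List (String × Int))) (stint : List (String × Int)) :
    PySem.Dict Int (List (String × Int)) :=
  match aGet? stint "driver_number" with
  | none => latest
  | some dn =>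
    let previous := latest.get? dn
    let candidate_key : Int × Int := (aGetD stint "stint_number" 0, aGetD stint "lap_end" 0)
    let previous_key : Int × Int :=
      match previous with
      | none => (0, 0)            -- (previous or {}).get(k, 0) = 0 when previous is None
      | some p => (aGetD p "stint_number" 0, aGetD p "lap_end" 0)
    if previous.isNone || tupGE candidate_key previous_key then latest.insert dn stint
    else latest

def latest_stints_py (stints : List (List (String × Int))) : List (Int × List (String × Int)) :=
  (stints.foldl aStep PySem.Dict.empty).items

-- ===== PORT B =====
def bGet? (st : List (String × Int)) (k : String) : Option Int :=
  (st.find? (fun p => p.1 == k)).map (fun p => p.2)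

-- the comprehension's key lambda: (s.get("stint_number", 0), s.get("lap_end", 0))
def bKey (s : List (String × Int)) : Int × Int :=
  ((bGet? s "stint_number").getD 0, (bGet? s "lap_end").getD 0)

-- Python tuple '>' on (int, int), lexicographic (used by max)
def tupGT (a b : Int × Int) : Bool := a.1 > b.1 || (a.1 == b.1 && a.2 > b.2)

-- body of B's grouping loop: groups.setdefault(dn, []).append(stint), i.e. groups[dn] = groups.get(dn, []) + [stint]
def bStep (groups : PySem.Dict Int (List (List (String × Int)))) (stint : List (String × Int)) :
    PySem.Dict Int (List (List (String × Int))) :=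
  match bGet? stint "driver_number" with
  | none => groups
  | some dn => groups.modify dn [] (fun g => g ++ [stint])

-- max(reversed(group), key=bKey): first element of the reversed list with maximal key
-- (groups are never empty; the [] branch is only a totality guard)
def bMax (group : List (List (String × Int))) : List (String × Int) :=
  match group.reverse with
  | [] => []
  | h :: t => t.foldl (fun best x => if tupGT (bKey x) (bKey best) then x else best) h

-- the dict comprehension over groups.items(): keys are already distinct, so it is a map
def latest_stints_py_alt (stints : List (List (String × Int))) : List (Int × List (String × Int)) :=
  ((stints.foldl bStep PySem.Dict.empty).items).map (fun p => (p.1, bMax p.2))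

-- ===== PRECONDITION & SPEC =====
def Spec_latest_stints_py (stints : List (List (String × Int))) (out : List (Int × List (String × Int))) : Prop := out = latest_stints_py_alt stints
instance (stints : List (List (String × Int))) (out : List (Int × List (String × Int))) : Decidable (Spec_latest_stints_py stints out) := by unfold Spec_latest_stints_py; infer_instance

-- ===== CLAIM (what is proved, stated in full; the proofs are below) =====
def Claim_equal_latest_stints_py : Prop := ∀ (stints : List (List (String × Int))), Dom_latest_stints_py stints → Spec_latest_stints_py stints (latest_stints_py stints)

-- ===== LEMMAS AND PROOFS =====

-- lexicographic ≤ on keys, as a Prop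
def kle (a b : Int × Int) : Prop := a.1 < b.1 ∨ (a.1 = b.1 ∧ a.2 ≤ b.2)

theorem tupGT_iff (a b : Int × Int) : tupGT a b = true ↔ ¬ kle a b := by
  simp only [tupGT, kle, Bool.or_eq_true, Bool.and_eq_true, decide_eq_true_eq, beq_iff_eq,
    gt_iff_lt]
  omega

theorem tupGE_iff (a b : Int × Int) : tupGE a b = true ↔ kle b a := by
  simp only [tupGE, kle, Bool.or_eq_true, Bool.and_eq_true, decide_eq_true_eq, beq_iff_eq,
    gt_iff_lt, ge_iff_le]
  omega

theorem kle_trans {a b c : Int × Int} (h1 : kle a b) (h2 : kle b c) : kle a c := by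
  simp only [kle] at *; omega

theorem kle_total (a b : Int × Int) : kle a b ∨ kle b a := by
  simp only [kle]; omega


theorem kle_of_not_tupGT {a b : Int × Int} (h : ¬ tupGT a b = true) : kle a b := by
  by_contra hc; exact h ((tupGT_iff a b).mpr hc)

-- the reduction step of Python's max with a key
def mStep (best x : List (String × Int)) : List (String × Int) :=
  if tupGT (bKey x) (bKey best) then x else best

theorem mStep_eq (best x : List (String × Int)) :
    (if tupGT (bKey x) (bKey best) then x else best) = mStep best x := rfl

theorem m_ge_start (l : List (List (String × Int))) (b : List (String × Int)) :
    kle (bKey b) (bKey (l.foldl mStep b)) := by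
  induction l generalizing b with
  | nil => exact Or.inr ⟨rfl, le_refl _⟩
  | cons h t ih =>
    simp only [List.foldl_cons]
    rcases kle_total (bKey h) (bKey b) with hb | hb
    · have : mStep b h = b := by simp [mStep, tupGT_iff, hb]
      rw [this]; exact ih b
    · by_cases hgt : tupGT (bKey h) (bKey b) = true
      · have : mStep b h = h := by simp [mStep, hgt]
        rw [this]; exact kle_trans hb (ih h)
      · have : mStep b h = b := by simp [mStep, hgt]
        rw [this]; exact ih b

theorem m_ge_mem (l : List (List (String × Int))) (b : List (String × Int))
    (x : List (String × Int)) (hx : x ∈ l) : kle (bKey x) (bKey (l.foldl mStep b)) := by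
  induction l generalizing b with
  | nil => cases hx
  | cons h t ih =>
    simp only [List.foldl_cons]
    rcases List.mem_cons.mp hx with rfl | hx'
    · exact kle_trans (by
        by_cases hgt : tupGT (bKey x) (bKey b) = true
        · have : mStep b x = x := by simp [mStep, hgt]
          rw [this]
          exact Or.inr ⟨rfl, le_refl _⟩
        · have h1 : kle (bKey x) (bKey b) := kle_of_not_tupGT hgt
          have : mStep b x = b := by simp [mStep, tupGT_iff, h1]
          rw [this]; exact h1) (m_ge_start t (mStep b x))
    · exact ih (mStep b h) hx'

theorem m_eq_start (l : List (List (String × Int))) (b : List (String × Int))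
    (h : ∀ x ∈ l, kle (bKey x) (bKey b)) : l.foldl mStep b = b := by
  induction l with
  | nil => rfl
  | cons hd t ih =>
    simp only [List.foldl_cons]
    have h1 : kle (bKey hd) (bKey b) := h hd (List.mem_cons_self ..)
    have : mStep b hd = b := by simp [mStep, tupGT_iff, h1]
    rw [this]
    exact ih (fun x hx => h x (List.mem_cons_of_mem _ hx))

theorem m_congr (t : List (List (String × Int))) :
    ∀ (h s : List (String × Int)), kle (bKey h) (bKey s) →
    ¬ kle (bKey (t.foldl mStep h)) (bKey s) → t.foldl mStep s = t.foldl mStep h := by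
  induction t with
  | nil => intro h s h1 h2; exact absurd h1 h2
  | cons x r ih =>
    intro h s h1 h2
    simp only [List.foldl_cons] at *
    by_cases hxs : tupGT (bKey x) (bKey s) = true
    · have hxh : tupGT (bKey x) (bKey h) = true := by
        rw [tupGT_iff] at hxs ⊢
        intro hc; exact hxs (kle_trans hc h1)
      have e1 : mStep s x = x := by simp [mStep, hxs]
      have e2 : mStep h x = x := by simp [mStep, hxh]
      rw [e1, e2] at *
    · have hle : kle (bKey x) (bKey s) := kle_of_not_tupGT hxs
      have e1 : mStep s x = s := by simp [mStep, tupGT_iff, hle]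
      rw [e1]
      have h1' : kle (bKey (mStep h x)) (bKey s) := by
        by_cases hgt : tupGT (bKey x) (bKey h) = true
        · have : mStep h x = x := by simp [mStep, hgt]
          rw [this]; exact hle
        · have : mStep h x = h := by simp [mStep, hgt]
          rw [this]; exact h1
      exact ih (mStep h x) s h1' h2

-- Python's max over s :: l, split off the first element
theorem m_cons (l : List (List (String × Int))) (h s : List (String × Int)) :
    (h :: l).foldl mStep s =
      if tupGE (bKey s) (bKey (l.foldl mStep h)) then s else l.foldl mStep h := by
  simp only [List.foldl_cons]
  by_cases hgt : tupGT (bKey h) (bKey s) = true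
  · have e : mStep s h = h := by simp [mStep, hgt]
    rw [e]
    have hns : ¬ kle (bKey h) (bKey s) := (tupGT_iff _ _).mp hgt
    have : ¬ kle (bKey (l.foldl mStep h)) (bKey s) := fun hc =>
      hns (kle_trans (m_ge_start l h) hc)
    simp [tupGE_iff, this]
  · have hle : kle (bKey h) (bKey s) := kle_of_not_tupGT hgt
    have e : mStep s h = s := by simp [mStep, tupGT_iff, hle]
    rw [e]
    by_cases hge : kle (bKey (l.foldl mStep h)) (bKey s)
    · have : l.foldl mStep s = s :=
        m_eq_start l s (fun x hx => kle_trans (m_ge_mem l h x hx) hge)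
      simp [tupGE_iff, hge, this]
    · rw [m_congr l h s hle hge]
      simp [tupGE_iff, hge]

-- appending one stint to a nonempty group updates its reversed max exactly like A's '>=' test
theorem bMax_snoc (g : List (List (String × Int))) (hg : g ≠ []) (s : List (String × Int)) :
    bMax (g ++ [s]) = if tupGE (bKey s) (bKey (bMax g)) then s else bMax g := by
  obtain ⟨h, t, ht⟩ : ∃ h t, g.reverse = h :: t := by
    cases hgr : g.reverse with
    | nil => exact absurd (by simpa using congrArg List.reverse hgr) hg
    | cons h t => exact ⟨h, t, rfl⟩
  have hrev : (g ++ [s]).reverse = s :: h :: t := by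
    rw [List.reverse_append]; simp [ht]
  simp only [bMax, hrev, ht]
  simpa only [mStep_eq] using m_cons t h s

-- the two get helpers agree definitionally
theorem bGet?_eq_aGet? : bGet? = aGet? := rfl

-- F maps a group entry to the reduced entry
theorem find?_map_F (items : List (Int × List (List (String × Int)))) (k : Int) :
    (items.map (fun p => (p.1, bMax p.2))).find? (fun p => p.1 == k) =
      (items.find? (fun p => p.1 == k)).map (fun p => (p.1, bMax p.2)) := by
  induction items with
  | nil => rfl
  | cons h t ih =>
    by_cases hk : (h.1 == k) = true
    · simp [List.find?, hk]
    · simp [List.find?, hk, ih]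

-- the loop invariant tying A's dict to B's group table
def PVInv (l : PySem.Dict Int (List (String × Int)))
    (g : PySem.Dict Int (List (List (String × Int)))) : Prop :=
  l.items = g.items.map (fun p => (p.1, bMax p.2)) ∧
  (∀ p ∈ g.items, p.2 ≠ []) ∧ g.keys.Nodup

theorem PVInv_contains {l : PySem.Dict Int (List (String × Int))} {g : PySem.Dict Int (List (List (String × Int)))} (h : PVInv l g) (k : Int) : l.contains k = g.contains k := by
  obtain ⟨h1, -, -⟩ := h
  simp only [PySem.Dict.contains, h1, List.any_map]
  rfl

theorem PVInv_get? {l : PySem.Dict Int (List (String × Int))} {g : PySem.Dict Int (List (List (String × Int)))} (h : PVInv l g) (k : Int) :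
    l.get? k = (g.get? k).map bMax := by
  obtain ⟨h1, -, -⟩ := h
  simp only [PySem.Dict.get?, h1, find?_map_F, Option.map_map]
  rfl

theorem PVInv_step {l : PySem.Dict Int (List (String × Int))} {g : PySem.Dict Int (List (List (String × Int)))} (h : PVInv l g) (st : List (String × Int)) :
    PVInv (aStep l st) (bStep g st) := by
  obtain ⟨h1, h2, h3⟩ := h
  unfold aStep bStep
  rw [bGet?_eq_aGet?]
  cases hdn : aGet? st "driver_number" with
  | none => exact ⟨h1, h2, h3⟩
  | some dn =>
    simp only
    have hget := PVInv_get? ⟨h1, h2, h3⟩ dn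
    have hcont := PVInv_contains ⟨h1, h2, h3⟩ dn
    cases hg : g.get? dn with
    | none =>
      -- new driver: both sides append
      have hgc : g.contains dn = false := by
        rw [PySem.Dict.contains_eq_isSome_get?, hg]; rfl
      have hlc : l.contains dn = false := by rw [hcont]; exact hgc
      have hprev : l.get? dn = none := by rw [hget, hg]; rfl
      rw [hprev]
      simp only [Option.isNone_none, Bool.true_or, if_true]
      have hmod : g.modify dn [] (fun gr => gr ++ [st]) = g.insert dn [st] := by
        simp [PySem.Dict.modify, PySem.Dict.getD_of_not_contains _ _ hgc]
      refine ⟨?_, ?_, ?_⟩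
      · rw [PySem.Dict.items_insert_of_not_contains _ _ hlc, hmod,
          PySem.Dict.items_insert_of_not_contains _ _ hgc, List.map_append, h1]
        rfl
      · rw [hmod, PySem.Dict.items_insert_of_not_contains _ _ hgc]
        intro p hp
        rcases List.mem_append.mp hp with hp' | hp'
        · exact h2 p hp'
        · simp at hp'; subst hp'; simp
      · rw [hmod, PySem.Dict.keys_insert_of_not_contains _ _ hgc]
        simpa [PySem.Dict.contains_eq_decide_mem_keys] using
          List.Nodup.append h3 (List.nodup_singleton dn)
            (by
              intro a ha hb
              simp at hb; subst hb
              have : g.contains a = true := by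
                rw [PySem.Dict.contains_eq_decide_mem_keys]; simpa using ha
              rw [this] at hgc; cases hgc)
    | some grp =>
      -- existing driver
      have hgc : g.contains dn = true := by
        rw [PySem.Dict.contains_eq_isSome_get?, hg]; rfl
      have hlc : l.contains dn = true := by rw [hcont]; exact hgc
      have hprev : l.get? dn = some (bMax grp) := by rw [hget, hg]; rfl
      have hgrp_ne : grp ≠ [] :=
        h2 (dn, grp) (PySem.Dict.mem_items_of_get?_eq_some _ hg)
      have hgetD : g.getD dn [] = grp := PySem.Dict.getD_of_get?_eq_some _ _ hg
      have hmod : g.modify dn [] (fun gr => gr ++ [st]) = g.insert dn (grp ++ [st]) := by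
        simp [PySem.Dict.modify, hgetD]
      have hsnoc := bMax_snoc grp hgrp_ne st
      rw [hprev]
      simp only [Option.isNone_some, Bool.false_or]
      have hPVInvB : PVInv (if tupGE (bKey st) (bKey (bMax grp)) then l.insert dn st else l)
          (g.insert dn (grp ++ [st])) := by
        refine ⟨?_, ?_, ?_⟩
        · rw [PySem.Dict.items_insert_of_contains _ _ hgc]
          by_cases hge : tupGE (bKey st) (bKey (bMax grp)) = true
          · rw [if_pos hge, PySem.Dict.items_insert_of_contains _ _ hlc, h1,
              List.map_map, List.map_map]
            apply List.map_congr_left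
            intro p hp
            by_cases hpk : (p.1 == dn) = true
            · simp only [Function.comp, hpk, if_true]
              simp [hsnoc, hge]
            · simp [Function.comp, hpk]
          · rw [if_neg hge, h1, List.map_map]
            apply List.map_congr_left
            intro p hp
            by_cases hpk : (p.1 == dn) = true
            · have hpdn : p.1 = dn := by simpa using hpk
              have hp2 : p.2 = grp := by
                have := PySem.Dict.get?_of_mem_items (d := g) (k := p.1) (v := p.2)
                  (by cases p; exact hp) h3
                rw [hpdn, hg] at this
                exact (Option.some_inj.mp this).symm
              simp only [Function.comp, hpk, if_true]
              rw [hsnoc, if_neg (by simpa using hge), hp2, hpdn]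
            · simp [Function.comp, hpk]
        · rw [PySem.Dict.items_insert_of_contains _ _ hgc]
          intro p hp
          rcases List.mem_map.mp hp with ⟨q, hq, hqe⟩
          by_cases hqk : (q.1 == dn) = true
          · rw [if_pos hqk] at hqe; subst hqe; simp [hgrp_ne]
          · rw [if_neg hqk] at hqe; subst hqe; exact h2 q hq
        · rw [PySem.Dict.keys_insert_of_contains _ _ hgc]
          exact h3
      rw [hmod]
      -- candidate_key / previous_key are definitionally bKey st / bKey (bMax grp)
      exact hPVInvB

theorem PVInv_fold (stints : List (List (String × Int))) :
    ∀ l g, PVInv l g → PVInv (stints.foldl aStep l) (stints.foldl bStep g) := by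
  induction stints with
  | nil => intro l g h; exact h
  | cons st t ih =>
    intro l g h
    simp only [List.foldl_cons]
    exact ih _ _ (PVInv_step h st)

theorem PVInv_empty : PVInv PySem.Dict.empty PySem.Dict.empty := by
  refine ⟨rfl, ?_, ?_⟩
  · intro p hp; cases hp
  · exact List.nodup_nil

-- ===== VERDICT (by name: the statement is the Claim_ definition above) =====
theorem latest_stints_py_spec : Claim_equal_latest_stints_py := by
  intro stints _
  unfold Spec_latest_stints_py latest_stints_py latest_stints_py_alt
  exact (PVInv_fold stints _ _ PVInv_empty).1
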